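-- pv_equiv track=rewrite | github.com/TeunKoenders/aoc | aoc5/puzzle1.py | cmp_startswith_most_bs
-- ===== SOURCE A (Python) =====
-- def cmp_startswith_most_bs(inp):
--     i = 0
--     for c in inp:
--         if c == "B":
--             i += 1
--         else:
--             break
--     return i
-- ===== SOURCE B (Python) =====
-- def cmp_startswith_most_bs(inp):
--     return len(inp) - len(inp.lstrip("B"))
-- ===== Notes on version B (the rewrite author's own statement) =====
-- stated objective: simpler
-- what changed: Replaces the explicit per-character counting loop by stripping the leading run with str.lstrip and returning the length difference, with no loop, counter or branch in B.
import Mathlib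
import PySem

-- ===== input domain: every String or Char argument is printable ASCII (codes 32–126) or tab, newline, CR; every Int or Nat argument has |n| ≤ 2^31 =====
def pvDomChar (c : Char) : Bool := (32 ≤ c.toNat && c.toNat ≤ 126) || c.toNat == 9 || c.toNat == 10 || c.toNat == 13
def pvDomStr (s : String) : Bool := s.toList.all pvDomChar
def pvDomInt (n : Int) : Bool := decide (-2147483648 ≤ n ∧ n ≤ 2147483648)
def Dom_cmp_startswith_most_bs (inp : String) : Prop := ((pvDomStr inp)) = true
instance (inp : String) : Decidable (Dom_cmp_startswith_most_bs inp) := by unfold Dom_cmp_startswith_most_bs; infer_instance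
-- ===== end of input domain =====

-- B replaces A's counting loop by len(inp) - len(inp.lstrip("B")): simpler, no explicit loop.

-- ===== PORT A =====
-- A's for-loop with break: structural recursion carrying the counter i.
def pvALoop : List Char → Int → Int
  | [], i => i
  | c :: rest, i => if c == 'B' then pvALoop rest (i + 1) else i

def cmp_startswith_most_bs (inp : String) : Int := pvALoop inp.toList 0

-- ===== PORT B =====
-- inp.lstrip("B") ported by hand as dropWhile (membership in {'B'}): exact CPython
-- semantics of str.lstrip with an explicit char-set argument.
def cmp_startswith_most_bs_alt (inp : String) : Int :=
  (inp.toList.length : Int) - (inp.toList.dropWhile (fun c => ['B'].contains c)).length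

-- ===== PRECONDITION & SPEC =====
def Spec_cmp_startswith_most_bs (inp : String) (out : Int) : Prop := out = cmp_startswith_most_bs_alt inp
instance (inp : String) (out : Int) : Decidable (Spec_cmp_startswith_most_bs inp out) := by unfold Spec_cmp_startswith_most_bs; infer_instance

-- ===== CLAIM (what is proved, stated in full; the proofs are below) =====
def Claim_equal_cmp_startswith_most_bs : Prop := ∀ (inp : String), Dom_cmp_startswith_most_bs inp → Spec_cmp_startswith_most_bs inp (cmp_startswith_most_bs inp)

-- ===== LEMMAS AND PROOFS =====
theorem pvALoop_eq (l : List Char) (i : Int) :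
    pvALoop l i = i + (l.takeWhile (fun c => c == 'B')).length := by
  induction l generalizing i with
  | nil => simp [pvALoop]
  | cons c rest ih =>
    by_cases h : c == 'B'
    · simp [pvALoop, h, ih, List.takeWhile_cons_of_pos]
      ring
    · simp [pvALoop, h, List.takeWhile_cons_of_neg]

theorem pvDropWhile_len (l : List Char) :
    (l.length : Int) - (l.dropWhile (fun c => ['B'].contains c)).length
      = (l.takeWhile (fun c => c == 'B')).length := by
  have hp : (fun c => ['B'].contains c) = (fun c : Char => c == 'B') := by
    funext c; by_cases hc : c = 'B' <;> simp [hc]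
  rw [hp]
  have := List.takeWhile_append_dropWhile (p := fun c : Char => c == 'B') (l := l)
  have hl : l.length = (l.takeWhile (fun c : Char => c == 'B')).length
      + (l.dropWhile (fun c : Char => c == 'B')).length := by
    conv_lhs => rw [← this]
    exact List.length_append ..
  omega

-- ===== VERDICT (by name: the statement is the Claim_ definition above) =====
theorem cmp_startswith_most_bs_spec : Claim_equal_cmp_startswith_most_bs := by
  intro inp _
  unfold Spec_cmp_startswith_most_bs cmp_startswith_most_bs cmp_startswith_most_bs_alt
  rw [pvALoop_eq, pvDropWhile_len]
  ring
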